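-- pv_equiv track=rewrite | github.com/nlitsme/mpmp7_solver | mpmp7_unique_distances.py | hasuniquedistance
-- ===== SOURCE A (Python) =====
-- from itertools import combinations, permutations, product
--
-- def distance_squared(p, q):
--     """
--     Calculate the square of the distance between two points.
--     Don't bother taking the square root, this will only slow things down.
--     """
--     return sum(((p-q)**2 for p, q in zip(p, q)))
--
-- def hasuniquedistance(pieces):
--     """
--     Enumerate all pairs of counters and check if all distances are unique.
--     """
--     distances = set()
--     for p, q in combinations(pieces, 2):
--         d = distance_squared(p, q)
--         if d in distances:
--             return False
--         distances.add(d)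
--     return True
-- ===== SOURCE B (Python) =====
-- from itertools import combinations
--
-- def distance_squared(p, q):
--     return sum(((p-q)**2 for p, q in zip(p, q)))
--
-- def hasuniquedistance(pieces):
--     dists = sorted(distance_squared(p, q) for p, q in combinations(pieces, 2))
--     return all(a != b for a, b in zip(dists, dists[1:]))
-- ===== Notes on version B (the rewrite author's own statement) =====
-- stated objective: alternative
-- what changed: Replaces A's incremental hash-set membership loop with early return by collecting all squared pair distances, sorting them, and doing a single adjacent-equality scan over the sorted list.
import Mathlib
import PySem

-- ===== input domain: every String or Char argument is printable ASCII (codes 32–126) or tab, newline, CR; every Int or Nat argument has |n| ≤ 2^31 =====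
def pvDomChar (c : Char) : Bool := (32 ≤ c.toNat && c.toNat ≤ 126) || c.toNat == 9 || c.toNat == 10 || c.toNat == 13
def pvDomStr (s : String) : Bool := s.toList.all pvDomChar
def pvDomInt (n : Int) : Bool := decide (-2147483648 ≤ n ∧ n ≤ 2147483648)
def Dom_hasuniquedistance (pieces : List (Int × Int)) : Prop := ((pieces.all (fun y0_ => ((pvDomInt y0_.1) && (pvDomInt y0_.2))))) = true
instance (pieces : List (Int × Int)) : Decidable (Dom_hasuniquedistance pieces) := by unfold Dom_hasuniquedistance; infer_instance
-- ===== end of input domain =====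

-- B replaces A's incremental set-membership loop (with early return) by sorting all
-- squared pair distances once and scanning adjacent elements for equality (objective:
-- alternative algorithm of similar cost).


-- ===== PORT A =====
-- distance_squared(p, q): sum((p-q)**2 for p, q in zip(p, q)) on 2-tuples
def distance_squared (p q : Int × Int) : Int :=
  ((([p.1, p.2]).zip ([q.1, q.2])).map (fun pq => (pq.1 - pq.2) ^ 2)).sum

-- the 'for p, q in combinations(pieces, 2)' loop with its early 'return False';
-- the '_' branch is unreachable (every member of combinations(·, 2) has length 2)
def pvLoopA : List (List (Int × Int)) → PySem.Set Int → Bool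
  | [], _ => true
  | c :: rest, distances =>
    match c with
    | [p, q] =>
      let d := distance_squared p q
      if PySem.Set.contains distances d then false
      else pvLoopA rest (PySem.Set.add distances d)
    | _ => true

def hasuniquedistance (pieces : List (Int × Int)) : Bool :=
  pvLoopA (PySem.List.combinations pieces 2) PySem.Set.empty

-- ===== PORT B =====
-- 'distance_squared(p, q) for p, q in combinations(pieces, 2)'; '_' branch unreachable
def pvPairDist (c : List (Int × Int)) : Int :=
  match c with
  | [p, q] => distance_squared p q
  | _ => 0

def hasuniquedistance_alt (pieces : List (Int × Int)) : Bool :=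
  let dists := PySem.List.sorted ((PySem.List.combinations pieces 2).map pvPairDist) (fun x => x) false
  -- all(a != b for a, b in zip(dists, dists[1:]))  (dists[1:] = drop 1)
  (dists.zip (dists.drop 1)).all (fun ab => ab.1 != ab.2)

-- ===== PRECONDITION & SPEC =====
def Spec_hasuniquedistance (pieces : List (Int × Int)) (out : Bool) : Prop := out = hasuniquedistance_alt pieces
instance (pieces : List (Int × Int)) (out : Bool) : Decidable (Spec_hasuniquedistance pieces out) := by unfold Spec_hasuniquedistance; infer_instance

-- ===== CLAIM (what is proved, stated in full; the proofs are below) =====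
def Claim_equal_hasuniquedistance : Prop := ∀ (pieces : List (Int × Int)), Dom_hasuniquedistance pieces → Spec_hasuniquedistance pieces (hasuniquedistance pieces)

-- ===== LEMMAS AND PROOFS =====

-- A's loop returns True iff the distances of the remaining pairs are pairwise distinct
-- and none of them is already in the accumulated set.
theorem pvLoopA_eq_true_iff (l : List (List (Int × Int))) (s : PySem.Set Int)
    (hshape : ∀ c ∈ l, ∃ p q, c = [p, q]) :
    pvLoopA l s = true ↔ (l.map pvPairDist).Nodup ∧ ∀ d ∈ l.map pvPairDist, d ∉ s := by
  induction l generalizing s with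
  | nil => simp [pvLoopA]
  | cons c rest ih =>
    obtain ⟨p, q, rfl⟩ := hshape c (List.mem_cons_self ..)
    have hrest : ∀ c ∈ rest, ∃ p q, c = [p, q] := fun c hc => hshape c (List.mem_cons_of_mem _ hc)
    simp only [pvLoopA]
    cases hcc : PySem.Set.contains s (distance_squared p q) with
    | true =>
      have hmem : distance_squared p q ∈ s := (PySem.Set.contains_iff s _).mp hcc
      rw [if_pos rfl]
      simp only [Bool.false_eq_true, false_iff, List.map_cons, not_and, pvPairDist]
      intro _ hall
      exact (hall _ (List.mem_cons_self ..)) hmem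
    | false =>
      have hnm : distance_squared p q ∉ s := fun h => by
        have hco := (PySem.Set.contains_iff s _).mpr h
        rw [hcc] at hco; exact Bool.false_ne_true hco
      rw [if_neg (by simp)]
      rw [ih _ hrest]
      simp only [List.map_cons, List.nodup_cons, List.mem_cons, pvPairDist]
      constructor
      · rintro ⟨hnd, hall⟩
        refine ⟨⟨fun hd => ?_, hnd⟩, fun d hd => ?_⟩
        · exact (hall _ hd) (by simp [PySem.Set.mem_add])
        · rcases hd with rfl | hd
          · exact hnm
          · exact fun hs => (hall _ hd) (by simp [PySem.Set.mem_add, hs])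
      · rintro ⟨⟨hni, hnd⟩, hall⟩
        refine ⟨hnd, fun d hd => ?_⟩
        rw [PySem.Set.mem_add]
        rintro (hs | rfl)
        · exact (hall d (Or.inr hd)) hs
        · exact hni hd

-- On a (≤)-sorted list, "no two adjacent elements are equal" decides Nodup.
theorem adj_all_eq_decide_nodup (xs : List Int) (h : xs.Pairwise (· ≤ ·)) :
    ((xs.zip (xs.drop 1)).all (fun ab => ab.1 != ab.2)) = decide xs.Nodup := by
  induction xs with
  | nil => simp
  | cons a t ih =>
    cases t with
    | nil => simp
    | cons b u =>
      have h' : (b :: u).Pairwise (· ≤ ·) := h.tail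
      have hab : a ≤ b := (List.pairwise_cons.mp h).1 b (List.mem_cons_self ..)
      have hbu : ∀ x ∈ u, b ≤ x := (List.pairwise_cons.mp h').1
      have hmemiff : a ∈ u → a = b := fun hm => le_antisymm hab (hbu a hm)
      have ht := ih h'
      simp only [List.drop_succ_cons, List.drop_zero, List.zip_cons_cons, List.all_cons] at ht ⊢
      rw [Bool.eq_iff_iff]
      simp only [Bool.and_eq_true, ht, bne_iff_ne, decide_eq_true_eq, List.nodup_cons,
        List.mem_cons, not_or]
      tauto

-- every member of combinations(pieces, 2) is a two-element list
theorem combos_shape (pieces : List (Int × Int)) :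
    ∀ c ∈ PySem.List.combinations pieces 2, ∃ p q, c = [p, q] := by
  intro c hc
  have hlen : c.length = 2 := PySem.List.length_of_mem_combinations hc
  match c, hlen with
  | [p, q], _ => exact ⟨p, q, rfl⟩

theorem hasuniquedistance_eq (pieces : List (Int × Int)) :
    hasuniquedistance pieces = decide ((PySem.List.combinations pieces 2).map pvPairDist).Nodup := by
  unfold hasuniquedistance
  rw [Bool.eq_iff_iff]
  rw [pvLoopA_eq_true_iff _ _ (combos_shape pieces)]
  simp [PySem.Set.empty]

theorem hasuniquedistance_alt_eq (pieces : List (Int × Int)) :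
    hasuniquedistance_alt pieces = decide ((PySem.List.combinations pieces 2).map pvPairDist).Nodup := by
  unfold hasuniquedistance_alt
  rw [adj_all_eq_decide_nodup _ (PySem.List.sorted_pairwise ..)]
  congr 1
  exact propext ((PySem.List.sorted_perm ..).nodup_iff)

-- ===== VERDICT (by name: the statement is the Claim_ definition above) =====
theorem hasuniquedistance_spec : Claim_equal_hasuniquedistance := by
  intro pieces _
  unfold Spec_hasuniquedistance
  rw [hasuniquedistance_eq, hasuniquedistance_alt_eq]
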